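-- pv_equiv track=rewrite | github.com/2024-2-analitica-descriptiva/2024-2-LAB-01-programacion-basica-en-python-jfyusty | homework/pregunta_06.py | reduce_function
-- ===== SOURCE A (Python) =====
-- def reduce_function(mapped_data):
--     reduce_dict = {}    # Inicializa un diccionario vacío para almacenar los resultados reducidos.
--
--     for key, value in mapped_data:  # Itera sobre cada tupla (clave, valor) en la lista de datos mapeados.
--         if key in reduce_dict:  # Comprueba si la clave ya existe en el diccionario.
--             current_min, current_max = reduce_dict[key]     # Si la clave existe, extrae los valores actuales de mínimo y máximo asociados con la clave.
--             reduce_dict[key] = (min(current_min, value), max(current_max, value))   # Actualiza el diccionario para esta clave estableciendo nuevos valores de mínimo y máximo.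
--             # Utiliza la función `min` para comparar el mínimo actual con el nuevo valor y seleccionar el menor.
--             # Utiliza la función `max` para comparar el máximo actual con el nuevo valor y seleccionar el mayor.
--         else:
--             reduce_dict[key] = (value, value)    # Si la clave no existe en el diccionario, la añade y establece tanto el valor máximo como mínimo al valor actual.
--             # Esto se hace porque es la primera vez que encontramos esta clave, por lo tanto, el primer valor es tanto el máximo como el mínimo.
--     return reduce_dict  # Retorna el diccionario que contiene las claves y los valores acumulados.
-- ===== SOURCE B (Python) =====
-- def reduce_function(mapped_data):
--     groups = {}
--     for key, value in mapped_data: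
--         groups.setdefault(key, []).append(value)
--     return {key: (min(values), max(values)) for key, values in groups.items()}
-- ===== Notes on version B (the rewrite author's own statement) =====
-- stated objective: alternative
-- what changed: Replaces the streaming per-element min/max fold with a two-pass build-index-then-aggregate: first group all values per key into lists (setdefault), then build the result dict with min()/max() over each list.
import Mathlib
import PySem

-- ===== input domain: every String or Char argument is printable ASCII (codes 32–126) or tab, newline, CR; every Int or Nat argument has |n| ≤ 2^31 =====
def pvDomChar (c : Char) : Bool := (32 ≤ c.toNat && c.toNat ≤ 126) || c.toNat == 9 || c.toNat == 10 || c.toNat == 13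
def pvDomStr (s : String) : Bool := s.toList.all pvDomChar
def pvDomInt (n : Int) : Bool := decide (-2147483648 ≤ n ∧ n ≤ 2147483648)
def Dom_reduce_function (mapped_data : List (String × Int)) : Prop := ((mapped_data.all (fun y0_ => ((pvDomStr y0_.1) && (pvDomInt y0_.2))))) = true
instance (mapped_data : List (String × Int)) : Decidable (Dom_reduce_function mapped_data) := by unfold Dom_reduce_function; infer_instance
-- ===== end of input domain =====

-- B replaces A's streaming per-element min/max fold with two passes: group values per key, then min/max each list (objective: alternative decomposition, same cost).

-- ===== PORT A =====
-- the (min, max) pair A stores for `key` on seeing `value`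
def reduceStepVal (d : PySem.Dict String (Int × Int)) (p : String × Int) : Int × Int :=
  if d.contains p.1 then
    match d.get? p.1 with
    | some (mn, mx) => (min mn p.2, max mx p.2)
    | none => (p.2, p.2)   -- unreachable: contains = true
  else (p.2, p.2)

def reduce_function (mapped_data : List (String × Int)) : List (String × Int × Int) :=
  (mapped_data.foldl (fun d p => d.insert p.1 (reduceStepVal d p)) PySem.Dict.empty).items

-- ===== PORT B =====
-- the grouping pass: groups.setdefault(key, []).append(value)
def reduceGroups (mapped_data : List (String × Int)) : PySem.Dict String (List Int) :=
  mapped_data.foldl (fun g p => g.modify p.1 [] (· ++ [p.2])) PySem.Dict.empty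

def reduce_function_alt (mapped_data : List (String × Int)) : List (String × Int × Int) :=
  (reduceGroups mapped_data).items.map (fun p =>
    (p.1, ((PySem.List.min? p.2 (fun x => x)).getD 0, (PySem.List.max? p.2 (fun x => x)).getD 0)))

-- ===== PRECONDITION & SPEC =====
def Spec_reduce_function (mapped_data : List (String × Int)) (out : List (String × Int × Int)) : Prop := out = reduce_function_alt mapped_data
instance (mapped_data : List (String × Int)) (out : List (String × Int × Int)) : Decidable (Spec_reduce_function mapped_data out) := by unfold Spec_reduce_function; infer_instance

-- ===== CLAIM (what is proved, stated in full; the proofs are below) =====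
def Claim_equal_reduce_function : Prop := ∀ (mapped_data : List (String × Int)), Dom_reduce_function mapped_data → Spec_reduce_function mapped_data (reduce_function mapped_data)

-- ===== LEMMAS AND PROOFS =====

-- a lookup in A's accumulator: fold the pairwise-(min,max) step over the values filtered for k
def stepP (o : Option (Int × Int)) (v : Int) : Option (Int × Int) :=
  match o with
  | none => some (v, v)
  | some (mn, mx) => some (min mn v, max mx v)

lemma get?_foldA (l : List (String × Int)) (d : PySem.Dict String (Int × Int)) (k : String) :
    (l.foldl (fun d p => d.insert p.1 (reduceStepVal d p)) d).get? k
      = ((l.filter (fun p => p.1 == k)).map (·.2)).foldl stepP (d.get? k) := by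
  induction l generalizing d with
  | nil => simp
  | cons p t ih =>
    simp only [List.foldl_cons, List.filter_cons]
    by_cases hk : p.1 = k
    · subst hk
      simp only [beq_self_eq_true, if_pos, List.map_cons, List.foldl_cons, ih]
      congr 1
      rw [PySem.Dict.get?_insert_self]
      unfold reduceStepVal stepP
      rw [PySem.Dict.contains_eq_isSome_get?]
      cases d.get? p.1 with
      | none => simp
      | some q => cases q; simp
    · have hb : (p.1 == k) = false := by simpa using hk
      simp only [hb, if_neg, Bool.false_eq_true, not_false_iff, ih]
      congr 1
      rw [PySem.Dict.get?_insert, if_neg (Ne.symm hk)]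

lemma stepP_some (t : List Int) (mn mx : Int) :
    t.foldl stepP (some (mn, mx)) = some (t.foldl min mn, t.foldl max mx) := by
  induction t generalizing mn mx with
  | nil => rfl
  | cons x t ih =>
    simp only [List.foldl_cons, stepP]
    exact ih (min mn x) (max mx x)

lemma aggr_eq (vs : List Int) (hne : vs ≠ []) :
    some (((PySem.List.min? vs (fun x => x)).getD 0), ((PySem.List.max? vs (fun x => x)).getD 0))
      = vs.foldl stepP none := by
  cases vs with
  | nil => exact absurd rfl hne
  | cons v t =>
    rw [PySem.List.min?_id_cons, PySem.List.max?_id_cons]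
    simp only [List.foldl_cons, stepP, Option.getD_some]
    exact (stepP_some t v v).symm

lemma main_eq (l : List (String × Int)) : reduce_function l = reduce_function_alt l := by
  unfold reduce_function reduce_function_alt reduceGroups
  have ndA : (l.foldl (fun d p => d.insert p.1 (reduceStepVal d p)) PySem.Dict.empty).keys.Nodup :=
    PySem.Dict.nodup_keys_foldl_insert_key l (·.1) _ _ (by simp)
  have ndG : (l.foldl (fun g p => g.modify p.1 [] (· ++ [p.2])) PySem.Dict.empty).keys.Nodup :=
    PySem.Dict.nodup_keys_foldl_modify_key l (·.1) _ _ _ (by simp)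
  rw [PySem.Dict.items_eq_map_keys _ ndA ((0 : Int), (0 : Int)),
      PySem.Dict.items_eq_map_keys _ ndG ([] : List Int), List.map_map]
  have hkA := PySem.Dict.keys_foldl_insert_key (key := (·.1)) (l := l)
      (f := fun d p => reduceStepVal d p) (d := PySem.Dict.empty)
  have hkG := PySem.Dict.keys_foldl_modify_key (key := (·.1)) (l := l)
      (d0 := ([] : List Int)) (f := fun _ p => (· ++ [p.2])) (d := PySem.Dict.empty)
  simp only [PySem.Dict.keys_empty] at hkA hkG
  rw [hkA, hkG]
  apply List.map_congr_left
  intro k hk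
  have hkmem : k ∈ l.map (·.1) := by
    rcases (PySem.Set.mem_update _ _ _).1 hk with h | h
    · simp at h
    · exact h
  have hne : ((l.filter (fun p => p.1 == k)).map (·.2)) ≠ [] := by
    rcases List.mem_map.1 hkmem with ⟨p, hp, hpk⟩
    have : p ∈ l.filter (fun p => p.1 == k) := by
      refine List.mem_filter.2 ⟨hp, ?_⟩
      simp [hpk]
    intro hcon
    exact absurd (List.mem_map_of_mem (f := (·.2)) this) (by simp [hcon])
  have hG : (l.foldl (fun g p => g.modify p.1 [] (· ++ [p.2])) PySem.Dict.empty).getD k []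
      = (l.filter (fun p => p.1 == k)).map (·.2) := by
    rw [PySem.Dict.getD_foldl_modify_append, PySem.Dict.getD_empty]
    simp
  have hA : (l.foldl (fun d p => d.insert p.1 (reduceStepVal d p)) PySem.Dict.empty).get? k
      = some (((PySem.List.min? ((l.filter (fun p => p.1 == k)).map (·.2)) (fun x => x)).getD 0),
              ((PySem.List.max? ((l.filter (fun p => p.1 == k)).map (·.2)) (fun x => x)).getD 0)) := by
    rw [get?_foldA, PySem.Dict.get?_empty, ← aggr_eq _ hne]
  simp only [Function.comp]
  rw [PySem.Dict.getD_eq_get?_getD, hA, hG]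
  rfl

theorem reduce_function_spec : Claim_equal_reduce_function := by
  intro l _
  unfold Spec_reduce_function
  exact main_eq l
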